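-- pv_equiv track=rewrite | github.com/seoul-ssafy-class-2-studyclub/GaYoung_SSAFY | programmers/test.py | solution
-- ===== SOURCE A (Python) =====
-- from collections import defaultdict
-- from collections import deque
--
-- def insert(part_trie, word):
--     copy_trie = part_trie
--     q = deque(list(word))
--     while q:
--         char = q.popleft()
--         if char not in copy_trie:
--             copy_trie[char] = [0, {}]
--         copy_trie[char][0] += 1
--         copy_trie = copy_trie[char][1]
--
-- def find(trie, query):
--     cnt = 0
--     copy_trie = trie
--     if len(copy_trie) == 0:
--         return 0
--
--     q = deque(list(query))
--
--     while q:
--         char = q.popleft()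
--         if char == "?":
--             return cnt
--         else:
--             if char not in copy_trie:
--                 return 0
--             cnt = copy_trie[char][0]
--             copy_trie = copy_trie[char][1]
--
--     return cnt
--
-- def solution(words, queries):
--     answer = []
--     # 트라이 자료구조 활용하기!
--     trie = defaultdict(dict)
--     reversed_trie = defaultdict(dict)
--
--     # !!!쿼리가 모두 물음표인 경우 시간 초과가 발생하므로, 문자 길이에 따라 갯수 저장
--     length_list = [0] * 10001
--
--     # trie 만들기
--     for word in words:
--         length_word = len(word)
--         length_list[length_word] += 1
--
--         insert(trie[length_word], word)
--         insert(reversed_trie[length_word], word[::-1])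
--
--     # 찾기
--     for query in queries:
--         length_query = len(query)
--
--         if query.count('?') == length_query:  # 쿼리가 모두 물음표인 경우
--             answer.append(length_list[length_query])
--             continue
--         if query[0] == "?":  # 물음표로 시작하는 쿼리
--             answer.append(find(reversed_trie[length_query], query[::-1]))
--         else:
--             answer.append(find(trie[length_query], query))
--
--     return answer
-- ===== SOURCE B (Python) =====
-- def solution(words, queries):
--     # Bucket words by length once; answer each query by a direct scan of its
--     # bucket with startswith on the fixed part before the first '?' (reversing
--     # for '?'-leading queries) -- no trie.
--     by_len = {}
--     for w in words:
--         by_len.setdefault(len(w), []).append(w)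
--     answer = []
--     for q in queries:
--         bucket = by_len.get(len(q), [])
--         if all(c == '?' for c in q):
--             answer.append(len(bucket))
--         elif q[0] != '?':
--             i = q.find('?')
--             p = q if i < 0 else q[:i]
--             answer.append(sum(1 for w in bucket if w.startswith(p)))
--         else:
--             r = q[::-1]
--             p = r[:r.find('?')]
--             answer.append(sum(1 for w in bucket if w[::-1].startswith(p)))
--     return answer
-- ===== Notes on version B (the rewrite author's own statement) =====
-- stated objective: simpler
-- what changed: B drops the per-length forward/reversed tries and the 10001-entry length table entirely: it buckets words by length into one dict of lists and answers each query by scanning its bucket with startswith on the fixed part before the first '?' (reversing word and query for '?'-leading queries).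
-- outside the precondition, e.g. on solution(['abc'], ['?b?']): A returns [0], B returns [1]
import Mathlib
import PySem

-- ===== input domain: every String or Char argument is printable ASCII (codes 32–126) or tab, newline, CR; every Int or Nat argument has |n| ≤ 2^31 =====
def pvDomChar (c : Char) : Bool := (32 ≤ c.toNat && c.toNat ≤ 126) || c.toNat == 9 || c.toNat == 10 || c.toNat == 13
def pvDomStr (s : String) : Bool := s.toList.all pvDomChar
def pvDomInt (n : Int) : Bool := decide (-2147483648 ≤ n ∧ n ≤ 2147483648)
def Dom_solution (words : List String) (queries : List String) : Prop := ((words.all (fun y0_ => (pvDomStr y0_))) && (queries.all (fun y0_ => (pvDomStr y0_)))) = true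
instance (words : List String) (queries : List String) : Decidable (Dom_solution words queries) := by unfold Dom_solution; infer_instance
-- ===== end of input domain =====

-- B replaces A's per-length tries by per-length buckets scanned with startswith
-- on the fixed part before the first '?' (objective: simpler).

-- ===== PORT A =====
-- Python's nested dict-of-[count, subtrie] trie: insertion-ordered child list
-- encoded as (char, count, child, next-sibling); nil = the empty dict {}.
inductive PyTrie where
  | nil : PyTrie
  | node : Char → Int → PyTrie → PyTrie → PyTrie
deriving DecidableEq, Repr

-- insert(part_trie, word): walk the chars, creating [0,{}] entries (appended at
-- the end of the child list, as Python dict insertion does) and bumping counts.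
def insertT : PyTrie → List Char → PyTrie
  | t, [] => t
  | PyTrie.nil, c :: cs => PyTrie.node c 1 (insertT PyTrie.nil cs) PyTrie.nil
  | PyTrie.node c' n ch sib, c :: cs =>
      if c' = c then PyTrie.node c' (n + 1) (insertT ch cs) sib
      else PyTrie.node c' n ch (insertT sib (c :: cs))
termination_by t cs => (cs.length, sizeOf t)

-- 'char in copy_trie' / 'copy_trie[char]' on the child list
def lookupT : PyTrie → Char → Option (Int × PyTrie)
  | PyTrie.nil, _ => none
  | PyTrie.node c' n ch sib, c => if c' = c then some (n, ch) else lookupT sib c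

-- the while-loop of find
def goFind : PyTrie → Int → List Char → Int
  | _, cnt, [] => cnt
  | t, cnt, c :: cs =>
      if c = '?' then cnt
      else match lookupT t c with
        | none => 0
        | some (n, ch) => goFind ch n cs

-- find(trie, query); len(copy_trie) == 0 iff the trie is nil
def findT (t : PyTrie) (q : List Char) : Int :=
  if t = PyTrie.nil then 0 else goFind t 0 q

-- solution: one pass over words builds (trie, reversed_trie, length_list);
-- length_list[i] += 1 / length_list[i] is ported as List.set / List.getD, exact
-- for lengths ≤ 10000 (beyond, Python raises IndexError — excluded by Pre_);
-- word[::-1] is List.reverse (PySem.List.slice?_none_none_neg_one).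
def solution (words : List String) (queries : List String) : List Int :=
  let st := words.foldl
    (fun (st : PySem.Dict Int PyTrie × PySem.Dict Int PyTrie × List Int) w =>
      (st.1.insert (w.toList.length : Int) (insertT (st.1.getD (w.toList.length : Int) PyTrie.nil) w.toList),
       st.2.1.insert (w.toList.length : Int) (insertT (st.2.1.getD (w.toList.length : Int) PyTrie.nil) w.toList.reverse),
       st.2.2.set w.toList.length (st.2.2.getD w.toList.length 0 + 1)))
    (PySem.Dict.empty, PySem.Dict.empty, List.replicate 10001 (0 : Int))
  queries.foldl
    (fun answer q =>
      answer ++ [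
        if (PySem.Chars.count q.toList ['?'] : Int) = (q.toList.length : Int) then
          st.2.2.getD q.toList.length 0
        else if PySem.List.pyGet? q.toList 0 = some '?' then
          findT (st.2.1.getD (q.toList.length : Int) PyTrie.nil) q.toList.reverse
        else
          findT (st.1.getD (q.toList.length : Int) PyTrie.nil) q.toList])
    []

-- ===== PORT B =====
-- Source B: bucket words by length (setdefault/append), then answer each query by
-- countP with startswith on the fixed part before the first '?'.
def solution_alt (words : List String) (queries : List String) : List Int :=
  let byLen : PySem.Dict Int (List String) := words.foldl
    (fun d w => d.insert (w.toList.length : Int) (d.getD (w.toList.length : Int) [] ++ [w]))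
    PySem.Dict.empty
  queries.foldl
    (fun answer q =>
      answer ++ [
        if q.toList.all (fun c => c == '?') then
          ((byLen.getD (q.toList.length : Int) []).length : Int)
        else if PySem.List.pyGet? q.toList 0 ≠ some '?' then
          ((byLen.getD (q.toList.length : Int) []).countP (fun w =>
            PySem.Chars.startswith w.toList
              (if PySem.Chars.find q.toList ['?'] < 0 then q.toList
               else PySem.List.slice q.toList none (some (PySem.Chars.find q.toList ['?'])))) : Int)
        else
          ((byLen.getD (q.toList.length : Int) []).countP (fun w =>
            PySem.Chars.startswith w.toList.reverse
              (PySem.List.slice q.toList.reverse none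
                (some (PySem.Chars.find q.toList.reverse ['?'])))) : Int)])
    []

-- ===== PRECONDITION & SPEC =====
-- Pre_ excludes (a) inputs on which A raises IndexError on its 10001-entry
-- length table (a word, or an all-'?' query, longer than 10000), and (b)
-- queries that start AND end with '?' without being all '?' — a malformed
-- wildcard pattern outside the problem's format, on which A's 0 (the trie walk
-- aborts on the leading '?' of the reversed query) and B's count of the empty
-- fixed suffix are both accidental.
def Pre_solution (words : List String) (queries : List String) : Prop :=
  (∀ w ∈ words, w.toList.length ≤ 10000) ∧
  (∀ q ∈ queries, q.toList.length ≤ 10000 ∨ ¬ (q.toList.count '?' = q.toList.length)) ∧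
  (∀ q ∈ queries, ¬ (q.toList.head? = some '?') ∨ ¬ (q.toList.getLast? = some '?') ∨
    q.toList.count '?' = q.toList.length)
instance (words : List String) (queries : List String) : Decidable (Pre_solution words queries) := by
  unfold Pre_solution; infer_instance
def pvWitness_solution : List String × List String := (["ab", "cb", ""], ["a?", "??", "?b", "ab", ""])

def Spec_solution (words : List String) (queries : List String) (out : List Int) : Prop := out = solution_alt words queries
instance (words : List String) (queries : List String) (out : List Int) : Decidable (Spec_solution words queries out) := by unfold Spec_solution; infer_instance

-- ===== CLAIM (what is proved, stated in full; the proofs are below) =====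
def Claim_equal_solution : Prop := ∀ (words : List String) (queries : List String), Dom_solution words queries → Pre_solution words queries → Spec_solution words queries (solution words queries)

-- ===== LEMMAS AND PROOFS =====

-- spec-side view of a trie built by successive inserts
def selTails (ws : List (List Char)) (c : Char) : List (List Char) :=
  (ws.filter (fun w => w.head? == some c)).map List.tail

def specGo (ws : List (List Char)) (cnt : Int) : List Char → Int
  | [] => cnt
  | c :: cs =>
      if c = '?' then cnt
      else if ws.countP (fun w => w.head? == some c) = 0 then 0
      else specGo (selTails ws c) (ws.countP (fun w => w.head? == some c) : Int) cs

theorem pyGet?_zero_head {α : Type} (l : List α) : PySem.List.pyGet? l 0 = l.head? := by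
  cases l <;> simp [PySem.List.pyGet?, PySem.List.pyIdx?]

theorem singleton_prefix_iff (c : Char) (w : List Char) : [c] <+: w ↔ w.head? = some c := by
  cases w with
  | nil => simp
  | cons x xs => simp [List.cons_prefix_cons, eq_comm]

theorem lookupT_insertT_self (cs : List Char) (c : Char) : ∀ (t : PyTrie),
    lookupT (insertT t (c :: cs)) c =
      match lookupT t c with
      | none => some (1, insertT PyTrie.nil cs)
      | some (n, ch) => some (n + 1, insertT ch cs) := by
  intro t
  induction t with
  | nil => simp [insertT, lookupT]
  | node c'' n ch sib ihc ihs =>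
    by_cases h1 : c'' = c
    · subst h1; simp [insertT, lookupT]
    · simp [insertT, lookupT, h1, ihs]

theorem lookupT_insertT_ne (w : List Char) (c : Char) (hw : w.head? ≠ some c) :
    ∀ (t : PyTrie), lookupT (insertT t w) c = lookupT t c := by
  intro t
  cases w with
  | nil => simp [insertT]
  | cons c' cs =>
    have hcc : c' ≠ c := by simpa using hw
    induction t with
    | nil => simp [insertT, lookupT, hcc]
    | node c'' n ch sib ihc ihs =>
      by_cases h1 : c'' = c'
      · subst h1
        have h2 : c'' ≠ c := hcc
        simp [insertT, lookupT, h2]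
      · by_cases h2 : c'' = c
        · subst h2
          have h3 : ¬ (c'' = c') := h1
          have h4 : ¬ (c' = c'') := fun he => h1 he.symm
          simp [insertT, lookupT, h3, h4]
        · simp [insertT, lookupT, h1, h2, ihs]

theorem lookupT_foldl (ws : List (List Char)) (c : Char) : ∀ (t : PyTrie),
    lookupT (ws.foldl insertT t) c =
      match lookupT t c with
      | none =>
        if ws.countP (fun w => w.head? == some c) = 0 then none
        else some ((ws.countP (fun w => w.head? == some c) : Int),
                   (selTails ws c).foldl insertT PyTrie.nil)
      | some (n, ch) =>
        some (n + (ws.countP (fun w => w.head? == some c) : Int),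
              (selTails ws c).foldl insertT ch) := by
  induction ws with
  | nil =>
    intro t
    cases h : lookupT t c <;> simp [selTails, h]
  | cons w ws ih =>
    intro t
    rw [List.foldl_cons, ih]
    by_cases hc : w.head? = some c
    · obtain ⟨c1, cs⟩ : ∃ c1 cs, w = c1 :: cs := by
        cases w with
        | nil => simp at hc
        | cons a as => exact ⟨a, as, rfl⟩
      obtain ⟨cs, rfl⟩ := cs
      have hc1 : c1 = c := by simpa using hc
      subst hc1
      have hsel : selTails ((c1 :: cs) :: ws) c1 = cs :: selTails ws c1 := by
        simp [selTails]
      have hcnt : ((c1 :: cs) :: ws).countP (fun w => w.head? == some c1) =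
          ws.countP (fun w => w.head? == some c1) + 1 := by
        simp [List.countP_cons]
      rw [hsel, hcnt, lookupT_insertT_self]
      cases h : lookupT t c1 with
      | none =>
        have hnz : ws.countP (fun w => w.head? == some c1) + 1 ≠ 0 := by omega
        simp only [h, List.foldl_cons, if_neg hnz, Option.some.injEq, Prod.mk.injEq]
        exact ⟨by push_cast; ring, trivial⟩
      | some p =>
        obtain ⟨n, ch⟩ := p
        simp only [h, List.foldl_cons, Option.some.injEq, Prod.mk.injEq]
        exact ⟨by push_cast; ring, trivial⟩
    · have hsel : selTails (w :: ws) c = selTails ws c := by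
        simp only [selTails, List.filter_cons]
        have : (w.head? == some c) = false := by simpa using hc
        simp [this]
      have hcnt : (w :: ws).countP (fun w => w.head? == some c) =
          ws.countP (fun w => w.head? == some c) := by
        have : (w.head? == some c) = false := by simpa using hc
        simp [List.countP_cons, this]
      rw [hsel, hcnt, lookupT_insertT_ne w c hc]

theorem goFind_spec (q : List Char) : ∀ (ws : List (List Char)) (cnt : Int),
    goFind (ws.foldl insertT PyTrie.nil) cnt q = specGo ws cnt q := by
  induction q with
  | nil => intro ws cnt; simp [goFind, specGo]
  | cons c cs ih =>
    intro ws cnt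
    by_cases hq : c = '?'
    · simp [goFind, specGo, hq]
    · have hl := lookupT_foldl ws c PyTrie.nil
      have hnone : lookupT PyTrie.nil c = none := rfl
      rw [hnone] at hl
      by_cases hz : ws.countP (fun w => w.head? == some c) = 0
      · rw [if_pos hz] at hl
        simp only [goFind, if_neg hq, hl, specGo, if_pos hz]
      · rw [if_neg hz] at hl
        simp only [goFind, if_neg hq, hl, specGo, if_neg hz, ih]

theorem countP_cons_prefix (ws : List (List Char)) (c : Char) (p : List Char) :
    ws.countP (fun w => decide ((c :: p) <+: w)) =
      (selTails ws c).countP (fun w => decide (p <+: w)) := by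
  induction ws with
  | nil => simp [selTails]
  | cons w ws ih =>
    cases w with
    | nil =>
      have : selTails ([] :: ws) c = selTails ws c := by simp [selTails]
      simp [List.countP_cons, this, ih]
    | cons c' t =>
      by_cases h : c' = c
      · subst h
        have : selTails ((c' :: t) :: ws) c' = t :: selTails ws c' := by simp [selTails]
        simp [List.countP_cons, this, ih, List.cons_prefix_cons]
      · have hne : c ≠ c' := fun he => h he.symm
        have : selTails ((c' :: t) :: ws) c = selTails ws c := by simp [selTails, h]
        simp [List.countP_cons, this, ih, List.cons_prefix_cons, hne]

theorem countP_head_zero_filter (ws : List (List Char)) (c : Char)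
    (h : ws.countP (fun w => w.head? == some c) = 0) : selTails ws c = [] := by
  unfold selTails
  rw [List.countP_eq_length_filter] at h
  rw [List.length_eq_zero_iff] at h
  simp [h]

theorem specGo_eq_countP (cs : List Char) : ∀ (c : Char) (ws : List (List Char)) (cnt : Int),
    c ≠ '?' →
    specGo ws cnt (c :: cs) =
      (ws.countP (fun w => decide (((c :: cs).takeWhile (fun x => x != '?')) <+: w)) : Int) := by
  induction cs with
  | nil =>
    intro c ws cnt hc
    have hb : (c != '?') = true := by simp [hc]
    have htw : ((c :: ([] : List Char)).takeWhile (fun x => x != '?')) = [c] := by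
      simp [List.takeWhile_cons, hb]
    rw [htw]
    have hcp : ws.countP (fun w => decide ([c] <+: w)) = ws.countP (fun w => w.head? == some c) := by
      apply List.countP_congr
      intro w _
      simp [singleton_prefix_iff]
    simp only [specGo, if_neg hc, hcp]
    split
    · omega
    · rfl
  | cons c2 cs2 ih =>
    intro c ws cnt hc
    have hb : (c != '?') = true := by simp [hc]
    have htw : ((c :: c2 :: cs2).takeWhile (fun x => x != '?')) =
        c :: ((c2 :: cs2).takeWhile (fun x => x != '?')) := by
      simp [List.takeWhile_cons, hb]
    rw [htw]
    rw [show ws.countP (fun w => decide ((c :: (c2 :: cs2).takeWhile (fun x => x != '?')) <+: w)) =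
        (selTails ws c).countP (fun w => decide (((c2 :: cs2).takeWhile (fun x => x != '?')) <+: w)) from
      countP_cons_prefix ws c _]
    by_cases hz : ws.countP (fun w => w.head? == some c) = 0
    · rw [countP_head_zero_filter ws c hz]
      simp only [specGo, if_neg hc, if_pos hz, List.countP_nil]
      simp
    · simp only [specGo, if_neg hc, if_neg hz]
      by_cases h2 : c2 = '?'
      · subst h2
        have htw2 : (('?' :: cs2).takeWhile (fun x => x != '?')) = [] := by
          simp [List.takeWhile_cons]
        rw [htw2]
        have hnil : (selTails ws c).countP (fun w => decide (([] : List Char) <+: w)) =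
            (selTails ws c).length := by simp
        rw [hnil]
        have hlen : (selTails ws c).length = ws.countP (fun w => w.head? == some c) := by
          simp [selTails, List.countP_eq_length_filter]
        rw [hlen]
        simp [specGo]
      · exact ih c2 (selTails ws c) _ h2

theorem findT_eq_goFind (t : PyTrie) (q : List Char) : findT t q = goFind t 0 q := by
  cases t with
  | node c n ch sib => simp [findT]
  | nil =>
    cases q with
    | nil => simp [findT, goFind]
    | cons c cs =>
      by_cases h : c = '?' <;> simp [findT, goFind, lookupT, h]

-- the trie walk on a trie built from ws counts the ws that extend the fixed prefix
theorem findT_count (ws : List (List Char)) (c : Char) (cs : List Char) (hc : c ≠ '?') :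
    findT (ws.foldl insertT PyTrie.nil) (c :: cs) =
      (ws.countP (fun w => decide (((c :: cs).takeWhile (fun x => x != '?')) <+: w)) : Int) := by
  rw [findT_eq_goFind, goFind_spec, specGo_eq_countP cs c ws 0 hc]

-- ---- the word loop: split the triple state and characterise each component ----

theorem stateA_split (words : List String) :
    words.foldl
      (fun (st : PySem.Dict Int PyTrie × PySem.Dict Int PyTrie × List Int) w =>
        (st.1.insert (w.toList.length : Int) (insertT (st.1.getD (w.toList.length : Int) PyTrie.nil) w.toList),
         st.2.1.insert (w.toList.length : Int) (insertT (st.2.1.getD (w.toList.length : Int) PyTrie.nil) w.toList.reverse),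
         st.2.2.set w.toList.length (st.2.2.getD w.toList.length 0 + 1)))
      (PySem.Dict.empty, PySem.Dict.empty, List.replicate 10001 (0 : Int)) =
    (words.foldl (fun d w => d.insert (w.toList.length : Int) (insertT (d.getD (w.toList.length : Int) PyTrie.nil) w.toList)) PySem.Dict.empty,
     words.foldl (fun d w => d.insert (w.toList.length : Int) (insertT (d.getD (w.toList.length : Int) PyTrie.nil) w.toList.reverse)) PySem.Dict.empty,
     words.foldl (fun l w => l.set w.toList.length (l.getD w.toList.length 0 + 1)) (List.replicate 10001 (0 : Int))) := by
  refine Eq.trans (PySem.List.foldl_prod_mk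
      (fun d w => PySem.Dict.insert d (w.toList.length : Int)
        (insertT (d.getD (w.toList.length : Int) PyTrie.nil) w.toList))
      (fun (p : PySem.Dict Int PyTrie × List Int) w =>
        (PySem.Dict.insert p.1 (w.toList.length : Int)
          (insertT (p.1.getD (w.toList.length : Int) PyTrie.nil) w.toList.reverse),
         p.2.set w.toList.length (p.2.getD w.toList.length 0 + 1)))
      words PySem.Dict.empty (PySem.Dict.empty, List.replicate 10001 (0 : Int))) ?_
  refine congrArg _ ?_
  exact PySem.List.foldl_prod_mk
      (fun d w => PySem.Dict.insert d (w.toList.length : Int)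
        (insertT (d.getD (w.toList.length : Int) PyTrie.nil) w.toList.reverse))
      (fun l w => List.set l w.toList.length (l.getD w.toList.length 0 + 1))
      words PySem.Dict.empty (List.replicate 10001 (0 : Int))

theorem getD_foldl_insert_trie (f : String → List Char) (ws : List String) (L : Int) :
    ∀ (d : PySem.Dict Int PyTrie),
    (ws.foldl (fun d w => d.insert (w.toList.length : Int) (insertT (d.getD (w.toList.length : Int) PyTrie.nil) (f w))) d).getD L PyTrie.nil
      = ((ws.filter (fun w => (w.toList.length : Int) == L)).map f).foldl insertT (d.getD L PyTrie.nil) := by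
  induction ws with
  | nil => intro d; simp
  | cons w ws ih =>
    intro d
    rw [List.foldl_cons, ih, PySem.Dict.getD_insert]
    by_cases h : (w.toList.length : Int) = L
    · have hS : (w.length : Int) = L := by simpa using h
      have hf : (w :: ws).filter (fun w => (w.toList.length : Int) == L) =
          w :: ws.filter (fun w => (w.toList.length : Int) == L) := by
        simp [List.filter_cons, hS]
      rw [hf, if_pos h.symm, List.map_cons, List.foldl_cons, h]
    · have hS : ¬ ((w.length : Int) = L) := by simpa using h
      have hf : (w :: ws).filter (fun w => (w.toList.length : Int) == L) =
          ws.filter (fun w => (w.toList.length : Int) == L) := by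
        simp [List.filter_cons, hS]
      rw [hf, if_neg (fun he => h he.symm)]

theorem getD_foldl_append (ws : List String) (L : Int) :
    ∀ (d : PySem.Dict Int (List String)),
    (ws.foldl (fun d w => d.insert (w.toList.length : Int) (d.getD (w.toList.length : Int) [] ++ [w])) d).getD L []
      = d.getD L [] ++ ws.filter (fun w => (w.toList.length : Int) == L) := by
  induction ws with
  | nil => intro d; simp
  | cons w ws ih =>
    intro d
    rw [List.foldl_cons, ih, PySem.Dict.getD_insert]
    by_cases h : (w.toList.length : Int) = L
    · have hS : (w.length : Int) = L := by simpa using h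
      have hf : (w :: ws).filter (fun w => (w.toList.length : Int) == L) =
          w :: ws.filter (fun w => (w.toList.length : Int) == L) := by
        simp [List.filter_cons, hS]
      rw [hf, if_pos h.symm, h]
      simp
    · have hS : ¬ ((w.length : Int) = L) := by simpa using h
      have hf : (w :: ws).filter (fun w => (w.toList.length : Int) == L) =
          ws.filter (fun w => (w.toList.length : Int) == L) := by
        simp [List.filter_cons, hS]
      rw [hf, if_neg (fun he => h he.symm)]

theorem getD_foldl_set (ws : List String) (L : Nat) (hL : L ≤ 10000) :
    ∀ (l : List Int), l.length = 10001 → (∀ w ∈ ws, w.toList.length ≤ 10000) →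
    (ws.foldl (fun l w => l.set w.toList.length (l.getD w.toList.length 0 + 1)) l).getD L 0
      = l.getD L 0 + (ws.countP (fun w => w.toList.length == L) : Int) := by
  induction ws with
  | nil => intro l _ _; simp
  | cons w ws ih =>
    intro l hl hws
    have hwlen : w.toList.length ≤ 10000 := hws w (by simp)
    have hlen' : (l.set w.toList.length (l.getD w.toList.length 0 + 1)).length = 10001 := by
      simp [hl]
    rw [List.foldl_cons, ih _ hlen' (fun w' hw' => hws w' (List.mem_cons_of_mem _ hw')),
        List.countP_cons]
    by_cases h : w.toList.length = L
    · have hb : (w.toList.length == L) = true := beq_iff_eq.mpr h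
      rw [hb]
      have hlt : L < l.length := by omega
      have hset : (l.set w.toList.length (l.getD w.toList.length 0 + 1)).getD L 0
          = l.getD L 0 + 1 := by
        rw [h, List.getD_eq_getElem?_getD, List.getElem?_set, if_pos rfl, if_pos hlt]
        rfl
      rw [hset]
      simp only [if_pos trivial]
      push_cast
      ring
    · have hb : (w.toList.length == L) = false := by
        simp only [beq_eq_false_iff_ne, ne_eq]
        exact h
      rw [hb]
      have hset : (l.set w.toList.length (l.getD w.toList.length 0 + 1)).getD L 0
          = l.getD L 0 := by
        rw [List.getD_eq_getElem?_getD, List.getElem?_set, if_neg h,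
            ← List.getD_eq_getElem?_getD]
      rw [hset]
      simp

theorem count_go_singleton (c : Char) (l : List Char) : ∀ (fuel acc : Nat), l.length ≤ fuel →
    PySem.Chars.count.go [c] fuel l acc = acc + l.count c := by
  induction l with
  | nil => intro fuel acc _; cases fuel <;> simp [PySem.Chars.count.go]
  | cons x xs ih =>
    intro fuel acc hf
    cases fuel with
    | zero => simp at hf
    | succ f =>
      rw [PySem.Chars.count.go]
      by_cases h : c = x
      · subst h
        rw [if_pos (by simp [List.isPrefixOf])]
        have hdrop : List.drop ([c] : List Char).length (c :: xs) = xs := by simp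
        rw [hdrop, ih f (acc + 1) (by simp at hf ⊢; omega), List.count_cons]
        simp
        omega
      · rw [if_neg (by simp [List.isPrefixOf, h])]
        rw [ih f acc (by simp at hf ⊢; omega), List.count_cons]
        have hb : (x == c) = false := by
          simp only [beq_eq_false_iff_ne, ne_eq]
          exact fun he => h he.symm
        rw [hb]
        simp

theorem chars_count_singleton (s : List Char) (c : Char) :
    PySem.Chars.count s [c] = s.count c := by
  have h : ([c] : List Char).isEmpty = false := by simp
  rw [PySem.Chars.count, h]
  simp only [Bool.false_eq_true, if_false]
  rw [count_go_singleton c s s.length 0 le_rfl]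
  omega

theorem take_first_eq_takeWhile (c : Char) : ∀ (l : List Char) (j : Nat),
    [c] <+: l.drop j → (∀ i < j, ¬ [c] <+: l.drop i) → l.take j = l.takeWhile (fun x => x != c) := by
  intro l
  induction l with
  | nil => intro j hpre _; simp at hpre
  | cons x xs ih =>
    intro j hpre hmin
    cases j with
    | zero =>
      have hx : x = c := by
        simp [List.cons_prefix_cons] at hpre
        exact hpre.symm
      simp [List.takeWhile_cons, hx]
    | succ k =>
      have hx : x ≠ c := by
        have h0 := hmin 0 (Nat.succ_pos k)
        simp [List.cons_prefix_cons] at h0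
        exact fun he => h0 he.symm
      have hrec : xs.take k = xs.takeWhile (fun x => x != c) :=
        ih k (by simpa using hpre) (fun i hi => by
          have := hmin (i + 1) (by omega)
          simpa using this)
      simp [List.take_succ_cons, List.takeWhile_cons, hx, hrec]

theorem takeWhile_eq_self_of_not_mem (c : Char) (l : List Char) (h : c ∉ l) :
    l.takeWhile (fun x => x != c) = l := by
  induction l with
  | nil => rfl
  | cons x xs ih =>
    have hx : x ≠ c := fun he => h (by simp [he])
    simp [List.takeWhile_cons, hx, ih (fun hm => h (by simp [hm]))]

-- the fixed part Source B computes (find + slice) IS the takeWhile before the first '?'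
theorem bslice_eq_takeWhile (l : List Char) :
    (if PySem.Chars.find l ['?'] < 0 then l
     else PySem.List.slice l none (some (PySem.Chars.find l ['?']))) =
      l.takeWhile (fun x => x != '?') := by
  by_cases h : PySem.Chars.find l ['?'] < 0
  · rw [if_pos h]
    have he : PySem.Chars.find l ['?'] = -1 := by
      have := PySem.Chars.neg_one_le_find l ['?']
      omega
    have hni : ¬ (['?'] <:+: l) := (PySem.Chars.find_eq_neg_one_iff l ['?']).1 he
    have hnm : '?' ∉ l := fun hm => hni ((List.singleton_infix_iff '?' l).2 hm)
    exact (takeWhile_eq_self_of_not_mem '?' l hnm).symm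
  · rw [if_neg h]
    have h0 : 0 ≤ PySem.Chars.find l ['?'] := by omega
    rw [PySem.List.slice_to l h0]
    obtain ⟨h1, h2⟩ := PySem.Chars.find_spec h0
    exact take_first_eq_takeWhile '?' l _ h1 h2

-- bucket with Int keys = bucket with Nat lengths
theorem filter_int_len (words : List String) (L : Nat) :
    words.filter (fun w => (w.toList.length : Int) == (L : Int)) =
      words.filter (fun w => w.toList.length == L) := by
  apply List.filter_congr
  intro w _
  simp

theorem startswith_eq_decide (s p : List Char) :
    PySem.Chars.startswith s p = decide (p <+: s) := by
  by_cases h : p <+: s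
  · simp [(PySem.Chars.startswith_iff s p).mpr h, h]
  · have hne : PySem.Chars.startswith s p ≠ true :=
      fun hh => h ((PySem.Chars.startswith_iff s p).mp hh)
    simp [h, Bool.eq_false_iff.mpr hne]

theorem per_query (words : List String) (q : String)
    (hw : ∀ w ∈ words, w.toList.length ≤ 10000)
    (hq1 : (∀ c ∈ q.toList, c = '?') → q.toList.length ≤ 10000)
    (hq2 : q.toList.head? = some '?' → q.toList.getLast? = some '?' → ∀ c ∈ q.toList, c = '?') :
    (if (PySem.Chars.count q.toList ['?'] : Int) = (q.toList.length : Int) then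
      (words.foldl (fun l w => l.set w.toList.length (l.getD w.toList.length 0 + 1))
        (List.replicate 10001 (0 : Int))).getD q.toList.length 0
    else if PySem.List.pyGet? q.toList 0 = some '?' then
      findT ((words.foldl (fun d w => d.insert (w.toList.length : Int)
          (insertT (d.getD (w.toList.length : Int) PyTrie.nil) w.toList.reverse))
          PySem.Dict.empty).getD (q.toList.length : Int) PyTrie.nil) q.toList.reverse
    else
      findT ((words.foldl (fun d w => d.insert (w.toList.length : Int)
          (insertT (d.getD (w.toList.length : Int) PyTrie.nil) w.toList))
          PySem.Dict.empty).getD (q.toList.length : Int) PyTrie.nil) q.toList) =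
    (if q.toList.all (fun c => c == '?') then
      (((words.foldl (fun d w => d.insert (w.toList.length : Int)
          (d.getD (w.toList.length : Int) [] ++ [w])) PySem.Dict.empty).getD
          (q.toList.length : Int) []).length : Int)
    else if PySem.List.pyGet? q.toList 0 ≠ some '?' then
      (((words.foldl (fun d w => d.insert (w.toList.length : Int)
          (d.getD (w.toList.length : Int) [] ++ [w])) PySem.Dict.empty).getD
          (q.toList.length : Int) []).countP (fun w =>
        PySem.Chars.startswith w.toList
          (if PySem.Chars.find q.toList ['?'] < 0 then q.toList
           else PySem.List.slice q.toList none (some (PySem.Chars.find q.toList ['?'])))) : Int)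
    else
      (((words.foldl (fun d w => d.insert (w.toList.length : Int)
          (d.getD (w.toList.length : Int) [] ++ [w])) PySem.Dict.empty).getD
          (q.toList.length : Int) []).countP (fun w =>
        PySem.Chars.startswith w.toList.reverse
          (PySem.List.slice q.toList.reverse none
            (some (PySem.Chars.find q.toList.reverse ['?'])))) : Int)) := by
  have hempL : (PySem.Dict.empty : PySem.Dict Int (List String)).getD (q.toList.length : Int) [] = [] := by simp
  have hempT : ∀ (d : PySem.Dict Int PyTrie), d = PySem.Dict.empty → d.getD (q.toList.length : Int) PyTrie.nil = PyTrie.nil := by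
    intro d hd; subst hd; simp
  have hbuck : ∀ (x : PySem.Dict Int (List String)), x = PySem.Dict.empty →
      (words.foldl (fun d w => d.insert (w.toList.length : Int)
        (d.getD (w.toList.length : Int) [] ++ [w])) x).getD (q.toList.length : Int) []
      = words.filter (fun w => w.toList.length == q.toList.length) := by
    intro x hx; subst hx
    rw [getD_foldl_append words _ PySem.Dict.empty, hempL, List.nil_append,
        filter_int_len words q.toList.length]
  have hcond1 : ((PySem.Chars.count q.toList ['?'] : Int) = (q.toList.length : Int)) ↔
      (q.toList.all (fun c => c == '?') = true) := by
    rw [chars_count_singleton]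
    constructor
    · intro h
      have hn : q.toList.count '?' = q.toList.length := by exact_mod_cast h
      rw [List.all_eq_true]
      intro c hc
      exact beq_iff_eq.mpr (List.count_eq_length.mp hn c hc).symm
    · intro h
      have hn : q.toList.count '?' = q.toList.length :=
        List.count_eq_length.mpr (fun b hb => (beq_iff_eq.mp (List.all_eq_true.mp h b hb)).symm)
      exact_mod_cast congrArg (Nat.cast : Nat → Int) hn
  by_cases hall : q.toList.all (fun c => c == '?') = true
  · rw [if_pos (hcond1.mpr hall), if_pos hall]
    have hallc : ∀ c ∈ q.toList, c = '?' :=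
      fun c hc => beq_iff_eq.mp (List.all_eq_true.mp hall c hc)
    have hL : q.toList.length ≤ 10000 := hq1 hallc
    rw [getD_foldl_set words q.toList.length hL (List.replicate 10001 (0 : Int)) (by rw [List.length_replicate]) hw]
    have hrep : (List.replicate 10001 (0 : Int)).getD q.toList.length 0 = 0 := by
      rw [List.getD_eq_getElem?_getD, List.getElem?_replicate, if_pos (by omega)]
      rfl
    rw [hrep, hbuck _ rfl, ← List.countP_eq_length_filter]
    omega
  · rw [if_neg (fun hA => hall (hcond1.mp hA)), if_neg hall]
    by_cases hhead : PySem.List.pyGet? q.toList 0 = some '?'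
    · rw [if_pos hhead, if_neg (fun hne => hne hhead)]
      have hhead' : q.toList.head? = some '?' := by rwa [pyGet?_zero_head] at hhead
      have hne : q.toList ≠ [] := by
        intro h0; rw [h0] at hhead'; simp at hhead'
      have hlast : q.toList.getLast? ≠ some '?' := by
        intro hl
        have hallc := hq2 hhead' hl
        exact hall (List.all_eq_true.mpr (fun c hc => beq_iff_eq.mpr (hallc c hc)))
      have hrne : q.toList.reverse ≠ [] := by simpa using hne
      obtain ⟨c, cs, hr⟩ := List.exists_cons_of_ne_nil hrne
      have hc : c ≠ '?' := by
        intro he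
        apply hlast
        rw [← List.head?_reverse, hr, he]
        rfl
      have hmem : '?' ∈ q.toList.reverse :=
        List.mem_reverse.mpr (List.mem_of_mem_head? (by simp [hhead']))
      have hfind0 : 0 ≤ PySem.Chars.find q.toList.reverse ['?'] :=
        (PySem.Chars.find_nonneg_iff _ _).mpr ((List.singleton_infix_iff _ _).mpr hmem)
      have hp : PySem.List.slice q.toList.reverse none
          (some (PySem.Chars.find q.toList.reverse ['?'])) =
          q.toList.reverse.takeWhile (fun x => x != '?') := by
        rw [PySem.List.slice_to _ hfind0]
        exact take_first_eq_takeWhile '?' q.toList.reverse _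
          (PySem.Chars.find_spec hfind0).1 (PySem.Chars.find_spec hfind0).2
      rw [getD_foldl_insert_trie (fun w => w.toList.reverse) words (q.toList.length : Int)
            PySem.Dict.empty,
          hempT PySem.Dict.empty rfl, hbuck _ rfl, hp,
          filter_int_len words q.toList.length, hr,
          findT_count _ c cs hc, List.countP_map]
      congr 1
      apply List.countP_congr
      intro w _
      rw [startswith_eq_decide]
      simp only [Function.comp]
    · rw [if_neg hhead, if_pos hhead]
      have hne : q.toList ≠ [] := by
        intro h0
        exact hall (by rw [h0]; rfl)
      obtain ⟨c, cs, hql⟩ := List.exists_cons_of_ne_nil hne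
      have hc : c ≠ '?' := by
        intro he
        apply hhead
        rw [pyGet?_zero_head, hql, he]
        rfl
      have hp : (if PySem.Chars.find q.toList ['?'] < 0 then q.toList
          else PySem.List.slice q.toList none (some (PySem.Chars.find q.toList ['?']))) =
          q.toList.takeWhile (fun x => x != '?') := bslice_eq_takeWhile q.toList
      rw [getD_foldl_insert_trie (fun w => w.toList) words (q.toList.length : Int)
            PySem.Dict.empty,
          hempT PySem.Dict.empty rfl, hbuck _ rfl, hp,
          filter_int_len words q.toList.length, hql,
          findT_count _ c cs hc, List.countP_map]
      congr 1
      apply List.countP_congr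
      intro w _
      rw [startswith_eq_decide]
      simp only [Function.comp]


theorem solution_spec : Claim_equal_solution := by
  intro words queries _hdom hpre
  obtain ⟨hw, hq1, hq2⟩ := hpre
  unfold Spec_solution solution solution_alt
  rw [stateA_split]
  rw [PySem.List.foldl_append_singleton_eq_map, PySem.List.foldl_append_singleton_eq_map]
  simp only [List.nil_append]
  apply List.map_congr_left
  intro q hq
  exact per_query words q hw
    (fun hallc => (hq1 q hq).resolve_right
      (fun hno => hno (List.count_eq_length.mpr (fun b hb => (hallc b hb).symm))))
    (fun hh hl c hc => (List.count_eq_length.mp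
      (((hq2 q hq).resolve_left (not_not_intro hh)).resolve_left (not_not_intro hl)) c hc).symm)
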